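-- pv_equiv track=rewrite | github.com/zhuang09-code/DATA440_final_project | src/scoring.py | compute_keyword_count
-- ===== SOURCE A (Python) =====
-- def compute_keyword_count(papers: list, keywords: list[str]) -> int:
--     """
--     Count how many papers contain at least one keyword.
--     """
--     lowered_keywords = [k.lower().strip() for k in keywords if k.strip()]
--     count = 0
--
--     # Combine title and abstract for keyword search
--     for i in papers:
--         title = i.get("title") or ""
--         abstract = i.get("abstract") or ""
--         text = (title + " " + abstract).lower()
--
--         if any(keyword in text for keyword in lowered_keywords):
--             count += 1
--
--     return count
-- ===== SOURCE B (Python) =====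
-- def compute_keyword_count(papers: list, keywords: list[str]) -> int:
--     """
--     Count how many papers contain at least one keyword.
--     Keyword-major strategy: mark papers in a boolean hit-vector, one pass per keyword.
--     """
--     kws = [k.lower().strip() for k in keywords if k.strip()]
--     texts = [((p.get("title") or "") + " " + (p.get("abstract") or "")).lower()
--              for p in papers]
--     hit = [False] * len(texts)
--     for kw in kws:
--         hit = [b or (kw in t) for b, t in zip(hit, texts)]
--     return sum(hit)
-- ===== Notes on version B (the rewrite author's own statement) =====
-- stated objective: alternative
-- what changed: A scans paper-major with a short-circuiting any over keywords; B precomputes all texts, then traverses keyword-major, or-ing each keyword's matches into a boolean hit-vector and summing it.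
import Mathlib
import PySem

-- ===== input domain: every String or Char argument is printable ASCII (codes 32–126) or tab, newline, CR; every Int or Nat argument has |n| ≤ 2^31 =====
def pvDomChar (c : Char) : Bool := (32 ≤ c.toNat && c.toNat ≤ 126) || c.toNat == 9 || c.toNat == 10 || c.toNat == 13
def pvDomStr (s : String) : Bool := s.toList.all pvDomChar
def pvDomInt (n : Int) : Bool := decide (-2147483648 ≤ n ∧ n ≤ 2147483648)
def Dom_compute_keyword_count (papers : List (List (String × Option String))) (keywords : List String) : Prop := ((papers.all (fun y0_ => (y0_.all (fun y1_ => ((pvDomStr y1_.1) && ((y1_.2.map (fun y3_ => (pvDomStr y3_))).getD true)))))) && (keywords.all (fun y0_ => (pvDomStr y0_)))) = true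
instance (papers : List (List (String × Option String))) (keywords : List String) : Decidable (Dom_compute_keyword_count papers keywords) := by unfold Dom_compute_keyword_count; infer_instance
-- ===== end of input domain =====

-- B: keyword-major marking pass over precomputed texts instead of A's paper-major any-scan (alternative decomposition, same cost).
-- ===== PORT A =====
-- shared text/keyword preprocessing (both Pythons contain these identical expressions)
def pvText (p : List (String × Option String)) : String :=
  let title := match PySem.Dict.get? ⟨p⟩ "title" with | some (some s) => s | _ => ""
  let abstract := match PySem.Dict.get? ⟨p⟩ "abstract" with | some (some s) => s | _ => ""
  PySem.Str.lower (title ++ " " ++ abstract)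

def pvLowKws (keywords : List String) : List String :=
  (keywords.filter (fun k => PySem.Str.strip k != "")).map (fun k => PySem.Str.strip (PySem.Str.lower k))

def compute_keyword_count (papers : List (List (String × Option String))) (keywords : List String) : Int :=
  let lowered_keywords := pvLowKws keywords
  papers.foldl (fun count i =>
    let text := pvText i
    if lowered_keywords.any (fun keyword => PySem.Str.isIn keyword text) then count + 1 else count) 0

-- ===== PORT B =====
def compute_keyword_count_alt (papers : List (List (String × Option String))) (keywords : List String) : Int :=
  let kws := pvLowKws keywords
  let texts := papers.map pvText
  let hit := kws.foldl
    (fun hit kw => (hit.zip texts).map (fun bt => bt.1 || PySem.Str.isIn kw bt.2))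
    (List.replicate texts.length false)
  hit.foldl (fun s b => s + (if b then 1 else 0)) 0

-- ===== PRECONDITION & SPEC =====
def Spec_compute_keyword_count (papers : List (List (String × Option String))) (keywords : List String) (out : Int) : Prop := out = compute_keyword_count_alt papers keywords
instance (papers : List (List (String × Option String))) (keywords : List String) (out : Int) : Decidable (Spec_compute_keyword_count papers keywords out) := by unfold Spec_compute_keyword_count; infer_instance

-- ===== CLAIM (what is proved, stated in full; the proofs are below) =====
def Claim_equal_compute_keyword_count : Prop := ∀ (papers : List (List (String × Option String))) (keywords : List String), Dom_compute_keyword_count papers keywords → Spec_compute_keyword_count papers keywords (compute_keyword_count papers keywords)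

-- ===== LEMMAS AND PROOFS =====
theorem pv_zip_map (l : List String) (f : String → Bool) (kw : String) :
    ((l.map f).zip l).map (fun bt => bt.1 || PySem.Str.isIn kw bt.2)
    = l.map (fun t => f t || PySem.Str.isIn kw t) := by
  induction l with
  | nil => rfl
  | cons t l ih => simp only [List.map_cons, List.zip_cons_cons]; rw [ih]

theorem pv_hit_fold (kws : List String) (texts : List String) (f : String → Bool) :
    kws.foldl (fun hit kw => (hit.zip texts).map (fun bt => bt.1 || PySem.Str.isIn kw bt.2))
      (texts.map f)
    = texts.map (fun t => f t || kws.any (fun kw => PySem.Str.isIn kw t)) := by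
  induction kws generalizing f with
  | nil => simp
  | cons kw kws ih =>
    rw [List.foldl_cons, pv_zip_map, ih (fun t => f t || PySem.Str.isIn kw t)]
    simp only [List.any_cons, Bool.or_assoc]

theorem pv_sum_bool (l : List Bool) (a : Int) :
    l.foldl (fun s b => s + (if b then 1 else 0)) a = a + (l.countP id : Int) := by
  induction l generalizing a with
  | nil => simp
  | cons b l ih =>
    simp only [List.foldl_cons, ih, List.countP_cons]
    cases b <;> simp <;> omega

-- ===== VERDICT (by name: the statement is the Claim_ definition above) =====
theorem compute_keyword_count_spec : Claim_equal_compute_keyword_count := by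
  intro papers keywords _
  simp only [Spec_compute_keyword_count, compute_keyword_count, compute_keyword_count_alt]
  rw [show List.replicate (papers.map pvText).length false
        = (papers.map pvText).map (fun _ => false) from by simp,
    pv_hit_fold, pv_sum_bool]
  rw [PySem.List.foldl_if_add_one
    (fun i => (pvLowKws keywords).any (fun keyword => PySem.Str.isIn keyword (pvText i)))]
  simp [List.countP_map, Function.comp_def]
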